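-- pv_equiv track=rewrite | github.com/JoseManuelDavilaMancilla/HACKTheShelf | models/pipeline_crop.py | encontrar_espacios_vacios_filas
-- ===== SOURCE A (Python) =====
-- def rectangulos_intersectan(r1, r2):
--     x1_max, y1_min, x1_min, y1_max = r1
--     x2_min, y2_min, x2_max, y2_max = r2
--
--     # No hay intersección si uno está completamente a la izquierda/derecha o arriba/abajo del otro
--     if x1_min >= x2_max or x2_min >= x1_max:
--         return False
--     if y1_min >= y2_max or y2_min >= y1_max:
--         return False
--     return True
--
-- def encontrar_espacios_vacios_filas(rectangulos, posiciones, rectangulo_grande, tolerancia=50):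
--     from collections import defaultdict
--
--     # Agrupar rectángulos por fila
--     filas = defaultdict(list)
--     for rect, (fila, _) in posiciones.items():
--         filas[fila].append(rect)
--
--     espacios_vacios = []
--
--     for fila_id in sorted(filas):
--         fila = filas[fila_id]
--
--         for i in range(len(fila) - 1):
--             rect_izq = fila[i]
--             rect_der = fila[i + 1]
--
--             # Definir límites del espacio entre rectángulos
--             espacio_x_min = max(rect_izq[0], rect_izq[2]) # x_max del rectángulo izquierdo
--             espacio_x_max = min(rect_der[2], rect_der[2])  # x_min del rectángulo derecho
--             ancho = espacio_x_max - espacio_x_min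
--             y_min = max(rect_izq[1], rect_der[1])
--             y_max = min(rect_izq[3], rect_der[3])
--             if ancho >= tolerancia:
--                 nuevo_espacio = (espacio_x_max, y_min, espacio_x_min, y_max)
--
--                 # Verifica que no intersecte con ningún rectángulo existente
--                 interseca = any(rectangulos_intersectan(nuevo_espacio, r) for r in rectangulos)
--
--                 if not interseca:
--                     espacios_vacios.append(nuevo_espacio)
--
--
--
--     return espacios_vacios
-- ===== SOURCE B (Python) =====
-- def _ocupado(rects_sorted, lo, hi, y_min, y_max):
--     # rects_sorted is sorted by x_min: stop as soon as x_min >= hi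
--     for r in rects_sorted:
--         if r[0] >= hi:
--             return False
--         if r[2] > lo and r[1] < y_max and r[3] > y_min:
--             return True
--     return False
--
-- def encontrar_espacios_vacios_filas(rectangulos, posiciones, rectangulo_grande, tolerancia=50):
--     rects_sorted = sorted(rectangulos, key=lambda r: r[0])
--     filas = {}
--     for rect, (fila, _) in posiciones.items():
--         filas.setdefault(fila, []).append(rect)
--     espacios = []
--     for fila_id in sorted(filas):
--         fila = filas[fila_id]
--         for izq, der in zip(fila, fila[1:]):
--             lo = izq[0] if izq[0] >= izq[2] else izq[2]
--             hi = der[2]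
--             if hi - lo < tolerancia:
--                 continue
--             y_min = izq[1] if izq[1] >= der[1] else der[1]
--             y_max = izq[3] if izq[3] <= der[3] else der[3]
--             if not _ocupado(rects_sorted, lo, hi, y_min, y_max):
--                 espacios.append((hi, y_min, lo, y_max))
--     return espacios
-- ===== Notes on version B (the rewrite author's own statement) =====
-- stated objective: alternative
-- what changed: B replaces the per-candidate any(...) rescan of all rectangles by one upfront sort of rectangulos by x_min plus an early-exit prefix scan that stops at the first rectangle with x_min >= the gap's right edge, and generates candidate gaps by zipping each row with its tail instead of index arithmetic.
import Mathlib
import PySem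

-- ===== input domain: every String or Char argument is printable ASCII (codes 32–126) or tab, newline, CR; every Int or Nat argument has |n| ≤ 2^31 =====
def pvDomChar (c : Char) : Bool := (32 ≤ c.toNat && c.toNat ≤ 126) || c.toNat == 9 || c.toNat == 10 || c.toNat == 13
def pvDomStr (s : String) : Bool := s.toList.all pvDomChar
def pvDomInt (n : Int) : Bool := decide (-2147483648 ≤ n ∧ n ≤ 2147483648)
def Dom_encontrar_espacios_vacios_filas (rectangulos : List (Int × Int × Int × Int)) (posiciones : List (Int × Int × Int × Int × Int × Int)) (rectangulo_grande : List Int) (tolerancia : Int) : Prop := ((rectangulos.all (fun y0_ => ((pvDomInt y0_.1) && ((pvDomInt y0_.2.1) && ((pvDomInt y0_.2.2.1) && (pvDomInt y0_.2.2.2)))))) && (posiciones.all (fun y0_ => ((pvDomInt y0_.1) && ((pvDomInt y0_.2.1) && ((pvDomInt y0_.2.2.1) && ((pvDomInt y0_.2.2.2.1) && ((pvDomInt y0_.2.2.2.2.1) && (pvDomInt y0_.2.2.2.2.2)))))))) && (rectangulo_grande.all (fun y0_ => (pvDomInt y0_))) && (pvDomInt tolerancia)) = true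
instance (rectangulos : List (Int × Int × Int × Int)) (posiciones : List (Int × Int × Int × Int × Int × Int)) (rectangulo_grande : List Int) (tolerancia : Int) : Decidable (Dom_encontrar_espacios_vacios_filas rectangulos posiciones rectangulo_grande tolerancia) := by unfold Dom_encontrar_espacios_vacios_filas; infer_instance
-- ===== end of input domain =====

-- B answers each overlap query by an early-exit scan of the rectangles pre-sorted by x_min instead of an any() rescan of all of them, and generates row gaps from zipped adjacent pairs (objective: alternative algorithm, same cost).
-- ===== PORT A =====
def rectangulos_intersectan (r1 r2 : Int × Int × Int × Int) : Bool :=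
  if r1.2.2.1 ≥ r2.2.2.1 || r2.1 ≥ r1.1 then false
  else if r1.2.1 ≥ r2.2.2.2 || r2.2.1 ≥ r1.2.2.2 then false
  else true

-- posiciones is a Python dict: build it with Python's overwrite semantics (first position, last value)
def pvDictPos (posiciones : List (Int × Int × Int × Int × Int × Int)) : PySem.Dict (Int × Int × Int × Int) (Int × Int) :=
  PySem.Dict.ofList (posiciones.map (fun p => ((p.1, p.2.1, p.2.2.1, p.2.2.2.1), (p.2.2.2.2.1, p.2.2.2.2.2))))

def encontrar_espacios_vacios_filas (rectangulos : List (Int × Int × Int × Int)) (posiciones : List (Int × Int × Int × Int × Int × Int)) (rectangulo_grande : List Int) (tolerancia : Int) : List (Int × Int × Int × Int) :=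
  let filas : PySem.Dict Int (List (Int × Int × Int × Int)) :=
    (pvDictPos posiciones).items.foldl
      (fun f p => f.modify p.2.1 [] (fun l => l ++ [p.1])) PySem.Dict.empty
  (PySem.List.sorted filas.keys (fun x => x) false).foldl (fun acc fila_id =>
    let fila := filas.getD fila_id []
    (PySem.List.pyRange 0 ((fila.length : Int) - 1) 1).foldl (fun acc i =>
      let rect_izq := PySem.List.pyGetD fila i (0, 0, 0, 0)
      let rect_der := PySem.List.pyGetD fila (i + 1) (0, 0, 0, 0)
      let espacio_x_min := max rect_izq.1 rect_izq.2.2.1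
      let espacio_x_max := min rect_der.2.2.1 rect_der.2.2.1
      let ancho := espacio_x_max - espacio_x_min
      let y_min := max rect_izq.2.1 rect_der.2.1
      let y_max := min rect_izq.2.2.2 rect_der.2.2.2
      if ancho ≥ tolerancia then
        let nuevo := (espacio_x_max, y_min, espacio_x_min, y_max)
        let interseca := rectangulos.any (fun r => rectangulos_intersectan nuevo r)
        if !interseca then acc ++ [nuevo] else acc
      else acc) acc) []

-- ===== PORT B =====
-- early-exit scan over rectangles sorted by x_min (Source B's _ocupado)
def pvOcupado (lo hi y_min y_max : Int) : List (Int × Int × Int × Int) → Bool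
  | [] => false
  | r :: rest =>
    if r.1 ≥ hi then false
    else if r.2.2.1 > lo && r.2.1 < y_max && r.2.2.2 > y_min then true
    else pvOcupado lo hi y_min y_max rest

def encontrar_espacios_vacios_filas_alt (rectangulos : List (Int × Int × Int × Int)) (posiciones : List (Int × Int × Int × Int × Int × Int)) (rectangulo_grande : List Int) (tolerancia : Int) : List (Int × Int × Int × Int) :=
  let rects_sorted := PySem.List.sorted rectangulos (fun r => r.1) false
  let filas : PySem.Dict Int (List (Int × Int × Int × Int)) :=
    (pvDictPos posiciones).items.foldl
      (fun f p => f.modify p.2.1 [] (fun l => l ++ [p.1])) PySem.Dict.empty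
  (PySem.List.sorted filas.keys (fun x => x) false).foldl (fun acc fila_id =>
    let fila := filas.getD fila_id []
    (fila.zip fila.tail).foldl (fun acc pr =>
      let izq := pr.1
      let der := pr.2
      let lo := if izq.1 ≥ izq.2.2.1 then izq.1 else izq.2.2.1
      let hi := der.2.2.1
      if hi - lo < tolerancia then acc
      else
        let y_min := if izq.2.1 ≥ der.2.1 then izq.2.1 else der.2.1
        let y_max := if izq.2.2.2 ≤ der.2.2.2 then izq.2.2.2 else der.2.2.2
        if pvOcupado lo hi y_min y_max rects_sorted then acc
        else acc ++ [(hi, y_min, lo, y_max)]) acc) []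

-- ===== PRECONDITION & SPEC =====
def Spec_encontrar_espacios_vacios_filas (rectangulos : List (Int × Int × Int × Int)) (posiciones : List (Int × Int × Int × Int × Int × Int)) (rectangulo_grande : List Int) (tolerancia : Int) (out : List (Int × Int × Int × Int)) : Prop := out = encontrar_espacios_vacios_filas_alt rectangulos posiciones rectangulo_grande tolerancia
instance (rectangulos : List (Int × Int × Int × Int)) (posiciones : List (Int × Int × Int × Int × Int × Int)) (rectangulo_grande : List Int) (tolerancia : Int) (out : List (Int × Int × Int × Int)) : Decidable (Spec_encontrar_espacios_vacios_filas rectangulos posiciones rectangulo_grande tolerancia out) := by unfold Spec_encontrar_espacios_vacios_filas; infer_instance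

-- ===== CLAIM (what is proved, stated in full; the proofs are below) =====
def Claim_equal_encontrar_espacios_vacios_filas : Prop := ∀ (rectangulos : List (Int × Int × Int × Int)) (posiciones : List (Int × Int × Int × Int × Int × Int)) (rectangulo_grande : List Int) (tolerancia : Int), Dom_encontrar_espacios_vacios_filas rectangulos posiciones rectangulo_grande tolerancia → Spec_encontrar_espacios_vacios_filas rectangulos posiciones rectangulo_grande tolerancia (encontrar_espacios_vacios_filas rectangulos posiciones rectangulo_grande tolerancia)

-- ===== LEMMAS AND PROOFS =====

theorem if_ge_eq_max (a b : Int) : (if a ≥ b then a else b) = max a b := by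
  split_ifs with h
  · exact (max_eq_left h).symm
  · exact (max_eq_right (le_of_not_ge h)).symm

theorem if_le_eq_min (a b : Int) : (if a ≤ b then a else b) = min a b := by
  split_ifs with h
  · exact (min_eq_left h).symm
  · exact (min_eq_right (le_of_not_ge h)).symm

-- the early-exit scan over an x_min-sorted list answers the same overlap query as any() over all rectangles
theorem pvOcupado_eq_any (lo hi y_min y_max : Int) (s : List (Int × Int × Int × Int))
    (hs : s.Pairwise (fun a b => a.1 ≤ b.1)) :
    pvOcupado lo hi y_min y_max s
      = s.any (fun r => rectangulos_intersectan (hi, y_min, lo, y_max) r) := by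
  induction s with
  | nil => rfl
  | cons r t ih =>
    rcases List.pairwise_cons.mp hs with ⟨hr, ht⟩
    by_cases h1 : r.1 ≥ hi
    · have hall : ∀ b ∈ t, rectangulos_intersectan (hi, y_min, lo, y_max) b = false := by
        intro b hb
        have h2 : r.1 ≤ b.1 := hr b hb
        have h3 : b.1 ≥ hi := le_trans h1 h2
        simp [rectangulos_intersectan, h3]
      have hr0 : rectangulos_intersectan (hi, y_min, lo, y_max) r = false := by
        simp [rectangulos_intersectan, h1]
      simp only [pvOcupado, if_pos h1, List.any_cons, hr0, Bool.false_or]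
      exact (List.any_eq_false.mpr (by intro b hb; simp [hall b hb])).symm
    · have hpr : rectangulos_intersectan (hi, y_min, lo, y_max) r
          = (r.2.2.1 > lo && r.2.1 < y_max && r.2.2.2 > y_min) := by
        simp only [rectangulos_intersectan]
        by_cases ha : r.2.2.1 > lo <;> by_cases hb : r.2.1 < y_max <;>
          by_cases hd : r.2.2.2 > y_min <;>
          simp [ha, hb, hd, h1] ; omega
      rw [show pvOcupado lo hi y_min y_max (r :: t)
          = (if r.2.2.1 > lo && r.2.1 < y_max && r.2.2.2 > y_min then true
             else pvOcupado lo hi y_min y_max t) from by simp [pvOcupado, h1]]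
      rw [List.any_cons, hpr, ih ht]
      cases hq : (r.2.2.1 > lo && r.2.1 < y_max && r.2.2.2 > y_min) <;> simp

-- the index loop i -> (fila[i], fila[i+1]) is the fold over zip(fila, fila[1:])
theorem idx_fold_eq_zip_fold {α β : Type} (G : β → α → α → β) (d : α) :
    ∀ (l : List α) (acc : β),
      (List.range (l.length - 1)).foldl (fun acc i => G acc (l.getD i d) (l.getD (i + 1) d)) acc
        = (l.zip l.tail).foldl (fun acc pr => G acc pr.1 pr.2) acc := by
  intro l
  induction l with
  | nil => intro acc; rfl
  | cons a t ih =>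
    intro acc
    cases t with
    | nil => rfl
    | cons b t' =>
      simp only [List.length_cons, Nat.add_sub_cancel, List.range_succ_eq_map,
        List.foldl_cons, List.foldl_map, List.tail_cons, List.zip_cons_cons]
      have h0 : (a :: b :: t').getD 0 d = a := rfl
      have h1 : (a :: b :: t').getD 1 d = b := rfl
      rw [h0, h1]
      have hbody : (fun (acc : β) (i : Nat) =>
            G acc ((a :: b :: t').getD i.succ d) ((a :: b :: t').getD (i.succ + 1) d))
          = (fun (acc : β) (i : Nat) => G acc ((b :: t').getD i d) ((b :: t').getD (i + 1) d)) := by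
        funext acc i
        rfl
      rw [hbody]
      have := ih (G acc a b)
      simpa using this

-- python range(len(l)-1) as pyRange, reduced to List.range
theorem pyRange_fold_eq_zip_fold {α β : Type} (G : β → α → α → β) (d : α) (l : List α) (acc : β) :
    (PySem.List.pyRange 0 ((l.length : Int) - 1) 1).foldl
        (fun acc i => G acc (PySem.List.pyGetD l i d) (PySem.List.pyGetD l (i + 1) d)) acc
      = (l.zip l.tail).foldl (fun acc pr => G acc pr.1 pr.2) acc := by
  cases l with
  | nil => rfl
  | cons a t =>
    have hlen : ((a :: t).length : Int) - 1 = (t.length : Int) := by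
      simp [List.length_cons]
    rw [hlen, PySem.List.pyRange_zero_natCast, List.foldl_map]
    have hbody : (fun (acc : β) (k : Nat) =>
          G acc (PySem.List.pyGetD (a :: t) (k : Int) d)
            (PySem.List.pyGetD (a :: t) ((k : Int) + 1) d))
        = (fun (acc : β) (k : Nat) => G acc ((a :: t).getD k d) ((a :: t).getD (k + 1) d)) := by
      funext acc k
      have : ((k : Int) + 1) = ((k + 1 : Nat) : Int) := by push_cast; ring
      rw [this, PySem.List.pyGetD_natCast, PySem.List.pyGetD_natCast]
    rw [hbody]
    have : t.length = (a :: t).length - 1 := rfl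
    rw [this]
    exact idx_fold_eq_zip_fold G d (a :: t) acc

-- ===== VERDICT (by name: the statement is the Claim_ definition above) =====
theorem encontrar_espacios_vacios_filas_spec : Claim_equal_encontrar_espacios_vacios_filas := by
  intro rectangulos posiciones rectangulo_grande tolerancia _
  unfold Spec_encontrar_espacios_vacios_filas
  unfold encontrar_espacios_vacios_filas encontrar_espacios_vacios_filas_alt
  simp only []
  congr 1
  funext acc fila_id
  rw [pyRange_fold_eq_zip_fold
    (G := fun (acc : List (Int × Int × Int × Int)) izq der =>
      if min der.2.2.1 der.2.2.1 - max izq.1 izq.2.2.1 ≥ tolerancia then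
        if (!rectangulos.any (fun r => rectangulos_intersectan
              (min der.2.2.1 der.2.2.1, max izq.2.1 der.2.1, max izq.1 izq.2.2.1,
                min izq.2.2.2 der.2.2.2) r)) = true then
          acc ++ [(min der.2.2.1 der.2.2.1, max izq.2.1 der.2.1, max izq.1 izq.2.2.1,
            min izq.2.2.2 der.2.2.2)]
        else acc
      else acc) (d := ((0 : Int), (0 : Int), (0 : Int), (0 : Int)))]
  congr 1
  funext acc2 pr
  simp only [if_ge_eq_max, if_le_eq_min, min_self]
  have hany : rectangulos.any
        (fun r => rectangulos_intersectan (pr.2.2.2.1, max pr.1.2.1 pr.2.2.1, max pr.1.1 pr.1.2.2.1, min pr.1.2.2.2 pr.2.2.2.2) r)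
      = pvOcupado (max pr.1.1 pr.1.2.2.1) pr.2.2.2.1 (max pr.1.2.1 pr.2.2.1) (min pr.1.2.2.2 pr.2.2.2.2)
          (PySem.List.sorted rectangulos (fun r => r.1) false) := by
    rw [pvOcupado_eq_any _ _ _ _ _ (PySem.List.sorted_pairwise rectangulos (fun r => r.1))]
    exact ((PySem.List.sorted_perm rectangulos (fun r => r.1) false).any_eq).symm
  simp only [hany]
  by_cases hc : pr.2.2.2.1 - max pr.1.1 pr.1.2.2.1 < tolerancia
  · simp [hc, not_le.mpr hc]
  · have hge : pr.2.2.2.1 - max pr.1.1 pr.1.2.2.1 ≥ tolerancia := not_lt.mp hc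
    simp only [if_neg hc, if_pos hge]
    cases h : pvOcupado (max pr.1.1 pr.1.2.2.1) pr.2.2.2.1 (max pr.1.2.1 pr.2.2.1) (min pr.1.2.2.2 pr.2.2.2.2)
        (PySem.List.sorted rectangulos (fun r => r.1) false) <;> simp
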